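-- pv_equiv track=rewrite | github.com/KiritoFD/algo_lab2 | alignment_utils.py | build_optimized_kmer_index
-- ===== SOURCE A (Python) =====
-- from collections import defaultdict
--
-- def build_optimized_kmer_index(ref: str, k: int = 15, skip_n: bool = True) -> dict:
--     """
--     Builds an optimized k-mer index from reference sequence.
--
--     Args:
--         ref: Reference sequence
--         k: k-mer size
--         skip_n: Whether to skip k-mers containing N
--
--     Returns:
--         Dictionary mapping k-mers to their positions in reference
--     """
--     index = defaultdict(list)
--     n_kmer = 'N' * k
--
--     for i in range(len(ref) - k + 1):
--         kmer = ref[i:i+k]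
--         # Skip k-mers with N if specified
--         if skip_n and 'N' in kmer:
--             continue
--         # Store position
--         index[kmer].append(i)
--
--     return index
-- ===== SOURCE B (Python) =====
-- from collections import defaultdict
--
-- def build_optimized_kmer_index(ref: str, k: int = 15, skip_n: bool = True) -> dict:
--     """Sliding-window rebuild: maintains a running count of 'N' characters in the
--     current window instead of rescanning each k-mer for 'N'."""
--     index = defaultdict(list)
--     limit = len(ref) - k + 1
--     if not (skip_n and k > 0):
--         # No N-filtering can ever trigger (skip_n off, or the k-mer is empty/degenerate).
--         for i in range(limit):
--             index[ref[i:i+k]].append(i)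
--         return index
--     ncount = ref[:k].count('N')
--     for i in range(limit):
--         if ncount == 0:
--             index[ref[i:i+k]].append(i)
--         if i + 1 < limit:
--             ncount += (ref[i+k] == 'N') - (ref[i] == 'N')
--     return index
-- ===== Notes on version B (the rewrite author's own statement) =====
-- stated objective: alternative
-- what changed: Replaces A's per-position substring scan of each k-mer for the character N with a sliding-window running count of N characters in the current window (updated in O(1) per shift), and a plain unfiltered loop when skip_n is off or k<=0.
-- outside the precondition, e.g. on build_optimized_kmer_index('NNN', -1, True): A returns {'': [1, 2, 3, 4]}, B returns {'NN': [0], '': [1, 2, 3, 4]}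
import Mathlib
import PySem

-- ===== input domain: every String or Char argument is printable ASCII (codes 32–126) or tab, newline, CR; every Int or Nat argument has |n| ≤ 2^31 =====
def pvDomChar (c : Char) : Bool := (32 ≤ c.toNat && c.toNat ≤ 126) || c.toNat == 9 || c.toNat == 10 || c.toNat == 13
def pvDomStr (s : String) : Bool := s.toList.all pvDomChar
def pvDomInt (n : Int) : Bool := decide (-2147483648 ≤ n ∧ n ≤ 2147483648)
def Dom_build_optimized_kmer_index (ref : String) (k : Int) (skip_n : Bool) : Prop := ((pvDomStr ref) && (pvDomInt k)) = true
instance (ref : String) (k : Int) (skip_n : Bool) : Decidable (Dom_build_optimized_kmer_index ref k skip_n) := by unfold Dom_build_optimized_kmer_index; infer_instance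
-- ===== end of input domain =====

-- B replaces A's per-position substring scan for 'N' by a sliding-window running count of 'N'
-- (plain unfiltered loop when skip_n is off or k ≤ 0); same return value, no speed claim.

-- ===== PORT A =====
-- one loop iteration of A: kmer = ref[i:i+k]; if skip_n and 'N' in kmer: continue; index[kmer].append(i)
def pvStepA (cs : List Char) (k : Int) (skip_n : Bool)
    (d : PySem.Dict (List Char) (List Int)) (i : Int) : PySem.Dict (List Char) (List Int) :=
  let kmer := PySem.List.slice cs (some i) (some (i + k))
  if skip_n && PySem.Chars.isIn ['N'] kmer then d
  else d.modify kmer [] (· ++ [i])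

def build_optimized_kmer_index (ref : String) (k : Int) (skip_n : Bool) : List (String × List Int) :=
  (((PySem.List.pyRange 0 ((ref.toList.length : Int) - k + 1) 1).foldl
      (pvStepA ref.toList k skip_n) PySem.Dict.empty).items).map (fun p => (String.mk p.1, p.2))

-- ===== PORT B =====
-- plain-loop iteration (no N filtering): index[ref[i:i+k]].append(i)
def pvStepPlain (cs : List Char) (k : Int)
    (d : PySem.Dict (List Char) (List Int)) (i : Int) : PySem.Dict (List Char) (List Int) :=
  d.modify (PySem.List.slice cs (some i) (some (i + k))) [] (· ++ [i])

-- sliding-window iteration carrying (index, ncount); ref[i+k] / ref[i] are in range whenever the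
-- guard i+1 < limit holds, so pyGetD's default 'A' is never read
def pvStepB (cs : List Char) (k limit : Int)
    (p : PySem.Dict (List Char) (List Int) × Int) (i : Int) : PySem.Dict (List Char) (List Int) × Int :=
  let d := if p.2 == 0 then p.1.modify (PySem.List.slice cs (some i) (some (i + k))) [] (· ++ [i]) else p.1
  let nc := if i + 1 < limit then
      p.2 + (if PySem.List.pyGetD cs (i + k) 'A' == 'N' then (1 : Int) else 0)
          - (if PySem.List.pyGetD cs i 'A' == 'N' then (1 : Int) else 0)
    else p.2
  (d, nc)

-- ref[:k].count('N'): a one-character needle, so str.count equals the character count (exact here)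
def build_optimized_kmer_index_alt (ref : String) (k : Int) (skip_n : Bool) : List (String × List Int) :=
  if !(skip_n && decide (0 < k)) then
    ((((PySem.List.pyRange 0 ((ref.toList.length : Int) - k + 1) 1).foldl
        (pvStepPlain ref.toList k) PySem.Dict.empty).items).map (fun p => (String.mk p.1, p.2)))
  else
    (((((PySem.List.pyRange 0 ((ref.toList.length : Int) - k + 1) 1).foldl
        (pvStepB ref.toList k ((ref.toList.length : Int) - k + 1))
        (PySem.Dict.empty, ((PySem.List.slice ref.toList none (some k)).count 'N' : Int))).1).items).map
      (fun p => (String.mk p.1, p.2)))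

-- ===== PRECONDITION & SPEC =====
-- Pre_ excludes negative k, outside the natural domain of a k-mer size: there range(len(ref)-k+1)
-- overruns the string and Python's negative slice end makes A filter phantom wraparound slices.
def Pre_build_optimized_kmer_index (ref : String) (k : Int) (skip_n : Bool) : Prop := 0 ≤ k
instance (ref : String) (k : Int) (skip_n : Bool) : Decidable (Pre_build_optimized_kmer_index ref k skip_n) := by
  unfold Pre_build_optimized_kmer_index; infer_instance

def pvWitness_build_optimized_kmer_index : String × Int × Bool := ("ACGNA", 2, true)

def Spec_build_optimized_kmer_index (ref : String) (k : Int) (skip_n : Bool) (out : List (String × List Int)) : Prop := out = build_optimized_kmer_index_alt ref k skip_n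
instance (ref : String) (k : Int) (skip_n : Bool) (out : List (String × List Int)) : Decidable (Spec_build_optimized_kmer_index ref k skip_n out) := by unfold Spec_build_optimized_kmer_index; infer_instance

-- ===== CLAIM (what is proved, stated in full; the proofs are below) =====
def Claim_equal_build_optimized_kmer_index : Prop := ∀ (ref : String) (k : Int) (skip_n : Bool), Dom_build_optimized_kmer_index ref k skip_n → Pre_build_optimized_kmer_index ref k skip_n → Spec_build_optimized_kmer_index ref k skip_n (build_optimized_kmer_index ref k skip_n)

-- ===== LEMMAS AND PROOFS =====

-- 'N' ∈ w as a substring test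
lemma pv_isIn_singleton (w : List Char) : PySem.Chars.isIn ['N'] w = true ↔ 'N' ∈ w := by
  rw [PySem.Chars.isIn_iff_infix]
  constructor
  · intro h; exact (List.singleton_sublist.mp h.sublist)
  · intro h
    obtain ⟨s, t, rfl⟩ := List.append_of_mem h
    exact ⟨s, t, by simp⟩

-- window shift: count over consecutive k-windows
lemma pv_shift (cs : List Char) (kk i : Nat) (h : i + kk < cs.length) :
    ((cs.drop (i+1)).take kk).count 'N' + (if cs[i] = 'N' then 1 else 0)
      = ((cs.drop i).take kk).count 'N' + (if cs[i+kk] = 'N' then 1 else 0) := by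
  have hi : i < cs.length := by omega
  have h2 : (cs.drop i).take (kk+1) = (cs.drop i).take kk ++ [cs[i+kk]] := by
    rw [List.take_succ, List.getElem?_drop]
    simp [List.getElem?_eq_getElem h]
  have h3 : (cs.drop i).take (kk+1) = cs[i] :: (cs.drop (i+1)).take kk := by
    rw [List.drop_eq_getElem_cons hi, List.take_succ_cons]
  have hc := congrArg (List.count 'N') (h2.symm.trans h3)
  simp only [List.count_append, List.count_cons, List.count_nil, beq_iff_eq] at hc
  split_ifs at hc ⊢ <;> omega

-- skip_n = false: A's test never fires
lemma pv_step_false (cs : List Char) (k : Int) : pvStepA cs k false = pvStepPlain cs k := by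
  funext d i
  simp [pvStepA, pvStepPlain]

-- k = 0: the empty k-mer contains no 'N'
lemma pv_step_zero (cs : List Char) (skip_n : Bool) (d : PySem.Dict (List Char) (List Int)) (i : Int)
    (hi : 0 ≤ i) : pvStepA cs 0 skip_n d i = pvStepPlain cs 0 d i := by
  have h0 : PySem.List.slice cs (some i) (some i) = ([] : List Char) := by
    rw [PySem.List.slice_toNat cs hi hi]
    simp
  have hIn : PySem.Chars.isIn ['N'] ([] : List Char) = false := by
    rw [PySem.Chars.isIn_eq_false_iff]
    simp
  simp [pvStepA, pvStepPlain, h0, hIn]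

-- main sliding-window invariant
lemma pv_loop (cs : List Char) (k : Int) (hk : 0 < k) :
    ∀ (n : Nat) (i : Int) (d : PySem.Dict (List Char) (List Int)) (nc : Int),
      i = ((cs.length : Int) - k + 1) - n → 0 ≤ i →
      (i < (cs.length : Int) - k + 1 → nc = (((cs.drop i.toNat).take k.toNat).count 'N' : Int)) →
      ((PySem.List.pyRange i ((cs.length : Int) - k + 1) 1).foldl (pvStepB cs k ((cs.length : Int) - k + 1)) (d, nc)).1
        = (PySem.List.pyRange i ((cs.length : Int) - k + 1) 1).foldl (pvStepA cs k true) d := by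
  intro n
  induction n with
  | zero =>
    intro i d nc hi _ _
    rw [PySem.List.pyRange_one_eq_nil (by omega)]
    simp
  | succ n ih =>
    intro i d nc hi h0 hnc
    have hwin := hnc (by omega)
    have hslice : PySem.List.slice cs (some i) (some (i + k)) = (cs.drop i.toNat).take k.toNat := by
      rw [PySem.List.slice_toNat cs h0 (by omega)]
      congr 1
      omega
    have hcond : PySem.Chars.isIn ['N'] ((cs.drop i.toNat).take k.toNat) = !(nc == 0) := by
      by_cases hN : 'N' ∈ (cs.drop i.toNat).take k.toNat
      · have hcnt : ((cs.drop i.toNat).take k.toNat).count 'N' ≠ 0 := by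
          simpa [List.count_eq_zero] using hN
        have hnz : nc ≠ 0 := by rw [hwin]; exact_mod_cast hcnt
        rw [(pv_isIn_singleton _).mpr hN]
        simp [hnz]
      · have hcnt : ((cs.drop i.toNat).take k.toNat).count 'N' = 0 := by
          simpa [List.count_eq_zero] using hN
        have hz : nc = 0 := by rw [hwin, hcnt]; rfl
        have : PySem.Chars.isIn ['N'] ((cs.drop i.toNat).take k.toNat) = false := by
          rw [← Bool.not_eq_true, pv_isIn_singleton]
          exact hN
        rw [this, hz]
        simp
    have hstep1 : (pvStepB cs k ((cs.length : Int) - k + 1) (d, nc) i).1 = pvStepA cs k true d i := by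
      simp only [pvStepB, pvStepA, hslice, hcond, Bool.true_and]
      cases hb : (nc == 0) <;> simp
    have hnc' : i + 1 < (cs.length : Int) - k + 1 →
        (pvStepB cs k ((cs.length : Int) - k + 1) (d, nc) i).2
          = (((cs.drop (i+1).toNat).take k.toNat).count 'N' : Int) := by
      intro hlt
      have hrange : i.toNat + k.toNat < cs.length := by omega
      have hs := pv_shift cs k.toNat i.toNat hrange
      have e1 : (i + k).toNat = i.toNat + k.toNat := by omega
      have e2 : (i + 1).toNat = i.toNat + 1 := by omega
      have ha1 : (0 : Int) ≤ i + k := by omega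
      have ha2 : i + k < (cs.length : Int) := by omega
      have hb2 : i < (cs.length : Int) := by omega
      simp only [pvStepB, if_pos hlt]
      rw [PySem.List.pyGetD_eq_getElem cs 'A' ha1 ha2, PySem.List.pyGetD_eq_getElem cs 'A' h0 hb2, hwin]
      simp only [e1, e2] at hs ⊢
      simp only [beq_iff_eq]
      split_ifs at hs ⊢ <;> omega
    rw [PySem.List.pyRange_one_cons (by omega)]
    simp only [List.foldl_cons]
    refine (ih (i + 1) (pvStepB cs k ((cs.length : Int) - k + 1) (d, nc) i).1
      (pvStepB cs k ((cs.length : Int) - k + 1) (d, nc) i).2 (by omega) (by omega) hnc').trans ?_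
    rw [hstep1]

-- ===== VERDICT (by name: the statement is the Claim_ definition above) =====
theorem build_optimized_kmer_index_spec : Claim_equal_build_optimized_kmer_index := by
  intro ref k skip_n _ hpre
  unfold Spec_build_optimized_kmer_index build_optimized_kmer_index build_optimized_kmer_index_alt
  cases skip_n with
  | false =>
    rw [if_pos (by simp), pv_step_false]
  | true =>
    by_cases hk : 0 < k
    · rw [if_neg (by simp [hk])]
      by_cases hlim : 0 < (ref.toList.length : Int) - k + 1
      · have h0 : ((PySem.List.slice ref.toList none (some k)).count 'N' : Int)
            = (((ref.toList.drop (0 : Int).toNat).take k.toNat).count 'N' : Int) := by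
          rw [PySem.List.slice_to ref.toList (by omega)]
          simp
        have hmain := pv_loop ref.toList k hk ((ref.toList.length : Int) - k + 1).toNat 0
          PySem.Dict.empty ((PySem.List.slice ref.toList none (some k)).count 'N' : Int)
          (by omega) le_rfl (fun _ => h0)
        rw [hmain]
      · rw [PySem.List.pyRange_one_eq_nil (by omega)]
        rfl
    · have hk0 : k = 0 := le_antisymm (by omega) hpre
      subst hk0
      rw [if_pos (by simp)]
      rw [PySem.List.foldl_congr_mem
        (h := fun acc x hx => pv_step_zero ref.toList true acc x
          ((PySem.List.mem_pyRange_one.mp hx).1))]
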